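-- pv_equiv track=rewrite | github.com/Vanshikagarwal1901/Time-Complexity-Analsyer-Compiler-Design | server.py | _is_single_closer_insertion_change
-- ===== SOURCE A (Python) =====
-- def _is_single_closer_insertion_change(before: str, after: str) -> bool:
--     allowed = {")", "]", "}"}
--     if len(after) != len(before) + 1:
--         return False
--
--     i = 0
--     j = 0
--     inserted = ""
--     while i < len(before) and j < len(after):
--         if before[i] == after[j]:
--             i += 1
--             j += 1
--             continue
--         if inserted:
--             return False
--         inserted = after[j]
--         j += 1
--
--     if not inserted and j < len(after):
--         inserted = after[j]
--         j += 1
--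
--     return i == len(before) and j == len(after) and inserted in allowed
-- ===== SOURCE B (Python) =====
-- def _is_single_closer_insertion_change(before: str, after: str) -> bool:
--     if len(after) != len(before) + 1:
--         return False
--     k = 0
--     while k < len(before) and before[k] == after[k]:
--         k += 1
--     # after[k] is the inserted char (k == len(before) means trailing insert)
--     return after[k] in (")", "]", "}") and before[k:] == after[k + 1:]
-- ===== Notes on version B (the rewrite author's own statement) =====
-- stated objective: simpler
-- what changed: Replaces A's stateful dual-pointer walk with an 'inserted' flag and a trailing-insert special case by a single split-point scan: find the first mismatch index k, take after[k] as the inserted char, and compare the tails directly.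
import Mathlib
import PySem

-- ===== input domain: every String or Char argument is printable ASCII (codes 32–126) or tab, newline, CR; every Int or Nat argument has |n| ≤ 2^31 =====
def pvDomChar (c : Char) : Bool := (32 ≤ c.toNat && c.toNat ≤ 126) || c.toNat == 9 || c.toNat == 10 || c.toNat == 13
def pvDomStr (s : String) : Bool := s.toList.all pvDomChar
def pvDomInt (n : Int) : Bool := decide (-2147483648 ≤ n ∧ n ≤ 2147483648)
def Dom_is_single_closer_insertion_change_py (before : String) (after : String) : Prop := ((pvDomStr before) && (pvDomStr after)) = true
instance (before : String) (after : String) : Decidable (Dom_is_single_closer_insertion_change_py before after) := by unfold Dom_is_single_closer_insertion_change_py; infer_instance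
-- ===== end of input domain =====

-- B replaces A's stateful dual-pointer walk (with its 'inserted' flag and trailing-insert
-- special case) by a split-point scan: first mismatch index, then direct tail comparison. Objective: simpler.

-- ===== PORT A =====
-- the while loop of A: state = remaining chars of before/after and the 'inserted' flag;
-- the second equation is the post-loop code (trailing insert + final checks)
def pvLoopA : List Char → List Char → Option Char → Bool
  | b :: bs, a :: as, ins =>
      if b = a then pvLoopA bs as ins
      else match ins with
        | some _ => false
        | none => pvLoopA (b :: bs) as (some a)
  | bs, as, ins =>
      let (ins', as') := match ins, as with
        | none, a :: as => (some a, as)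
        | ins, as => (ins, as)
      bs.isEmpty && as'.isEmpty &&
        (match ins' with
          | some c => c ∈ [')', ']', '}']
          | none => false)
  termination_by bs as _ => bs.length + as.length

def is_single_closer_insertion_change_py (before : String) (after : String) : Bool :=
  if after.toList.length ≠ before.toList.length + 1 then false
  else pvLoopA before.toList after.toList none

-- ===== PORT B =====
-- Source B's scan for the first mismatch k; on mismatch, after[k] must be a closer and the tails equal
def pvScanB : List Char → List Char → Bool
  | b :: bs, a :: as => if b = a then pvScanB bs as else (a ∈ [')', ']', '}']) && (b :: bs) == as
  | [], a :: as => (a ∈ [')', ']', '}']) && ([] : List Char) == as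
  | _, [] => false

def is_single_closer_insertion_change_py_alt (before : String) (after : String) : Bool :=
  if after.toList.length ≠ before.toList.length + 1 then false
  else pvScanB before.toList after.toList

-- ===== PRECONDITION & SPEC =====
def Spec_is_single_closer_insertion_change_py (before : String) (after : String) (out : Bool) : Prop := out = is_single_closer_insertion_change_py_alt before after
instance (before : String) (after : String) (out : Bool) : Decidable (Spec_is_single_closer_insertion_change_py before after out) := by unfold Spec_is_single_closer_insertion_change_py; infer_instance

-- ===== CLAIM (what is proved, stated in full; the proofs are below) =====
def Claim_equal_is_single_closer_insertion_change_py : Prop := ∀ (before : String) (after : String), Dom_is_single_closer_insertion_change_py before after → Spec_is_single_closer_insertion_change_py before after (is_single_closer_insertion_change_py before after)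

-- ===== LEMMAS AND PROOFS =====

-- ===== VERDICT (by name: the statement is the Claim_ definition above) =====
lemma pvLoopA_some (bs as : List Char) (c : Char) :
    pvLoopA bs as (some c) = ((c ∈ [')', ']', '}'] : Bool) && bs == as) := by
  induction bs generalizing as with
  | nil =>
    cases as with
    | nil => simp [pvLoopA]
    | cons a as => simp [pvLoopA]
  | cons b bs ih =>
    cases as with
    | nil => simp [pvLoopA]
    | cons a as =>
      by_cases h : b = a
      · subst h
        simp [pvLoopA, ih]
      · simp [pvLoopA, h, Ne.symm h]

lemma pvLoopA_none (bs as : List Char) (h : as.length = bs.length + 1) :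
    pvLoopA bs as none = pvScanB bs as := by
  induction bs generalizing as with
  | nil =>
    match as, h with
    | [a], _ => simp [pvLoopA, pvScanB]
  | cons b bs ih =>
    cases as with
    | nil => simp at h
    | cons a as =>
      by_cases hba : b = a
      · subst hba
        simp only [pvLoopA, pvScanB, if_pos rfl]
        exact ih as (by simpa using h)
      · simp only [pvLoopA, pvScanB, if_neg hba]
        exact pvLoopA_some (b :: bs) as a

theorem is_single_closer_insertion_change_py_spec : Claim_equal_is_single_closer_insertion_change_py := by
  intro before after _
  unfold Spec_is_single_closer_insertion_change_py
  unfold is_single_closer_insertion_change_py is_single_closer_insertion_change_py_alt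
  by_cases h : after.toList.length = before.toList.length + 1
  · rw [if_neg (by omega), if_neg (by omega)]
    exact pvLoopA_none _ _ h
  · rw [if_pos h, if_pos h]
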